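-- pv_equiv track=rewrite | github.com/pypi-data/pypi-mirror-63 | packages/ytApiTest/ytApiTest-1.0.13.tar.gz/ytApiTest-1.0.13/ytApiTest/apiAssert.py | singleton_assert_value
-- ===== SOURCE A (Python) =====
-- def rem_special_chars(string: str):
--     '''
--     删除特殊大括号中括号空格特殊字符
--     :param string:
--     :return:
--     '''
--
--     remap = {
--         ord("{"): None,
--         ord("["): None,
--         ord("}"): None,
--         ord(']'): None,
--         ord(' '): None,
--         ord('\"'): None,
--         ord("\'"): None
--
--     }
--
--     return string.translate(remap)
--
-- def singleton_assert_value(response_str: str, assert_str: str):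
--     '''
--     截取返回值单个值*****好像过度封装了
--     :param response_str:
--     :param assert_str:
--     :return:
--     '''
--     temp_list = []
--     response_list = rem_special_chars(response_str).split(':')
--     assert_list = rem_special_chars(assert_str).split(':')
--
--     for value in response_list:
--
--        for v in str(value).split(','):
--
--            temp_list.append(v)
--
--     if temp_list.count(assert_list[0]) and temp_list.count(assert_list[-1]):
--
--         return temp_list[temp_list.index(assert_list[0]):temp_list.index(assert_list[-1]) + 1]
--
--     elif temp_list.count(assert_list[0]):
--
--         return temp_list[temp_list.index(assert_list[0]):temp_list.index(assert_list[0]) + 2]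
-- ===== SOURCE B (Python) =====
-- def singleton_assert_value(response_str: str, assert_str: str):
--     '''One-pass char scan that strips special chars and tokenises in the same
--     sweep; position lookups by try/except index instead of count guards.'''
--     DROP = '{}[] "\''
--
--     def tokens(s, delims):
--         out, cur = [], []
--         for ch in s:
--             if ch in delims:
--                 out.append(''.join(cur))
--                 cur = []
--             elif ch not in DROP:
--                 cur.append(ch)
--         out.append(''.join(cur))
--         return out
--
--     temp = tokens(response_str, ':,')
--     aparts = tokens(assert_str, ':')
--     first, last = aparts[0], aparts[-1]
--     try:
--         i = temp.index(first)
--     except ValueError: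
--         return None
--     try:
--         j = temp.index(last)
--     except ValueError:
--         return temp[i:i + 2]
--     return temp[i:j + 1]
-- ===== Notes on version B (the rewrite author's own statement) =====
-- stated objective: simpler
-- what changed: Replaces translate-then-nested-split/append loops and count-guarded double index scans by a single character scan that strips special characters and tokenises in one pass, with try/except index lookups.
import Mathlib
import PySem

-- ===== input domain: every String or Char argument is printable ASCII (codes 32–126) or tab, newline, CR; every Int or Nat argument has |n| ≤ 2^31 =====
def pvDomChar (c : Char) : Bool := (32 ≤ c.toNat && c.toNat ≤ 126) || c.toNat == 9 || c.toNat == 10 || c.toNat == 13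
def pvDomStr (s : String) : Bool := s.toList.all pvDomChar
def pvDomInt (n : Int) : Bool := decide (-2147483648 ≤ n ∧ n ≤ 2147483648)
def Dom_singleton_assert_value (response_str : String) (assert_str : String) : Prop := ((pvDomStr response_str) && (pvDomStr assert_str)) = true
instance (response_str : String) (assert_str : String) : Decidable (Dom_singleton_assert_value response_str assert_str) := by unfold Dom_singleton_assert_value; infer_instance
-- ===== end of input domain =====

-- ===== PORT A =====
-- B replaces translate+nested split/append loops by a single char scan and count-guards by
-- try/except index lookups; objective: simpler (no speed claim).

-- port of rem_special_chars: str.translate with an all-None map deletes exactly these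
-- characters, ported as a character filter (exact)
def pvRemSpecialChars (s : String) : String :=
  String.ofList (s.toList.filter (fun c =>
    !(c == '{' || c == '[' || c == '}' || c == ']' || c == ' ' || c == '"' || c == '\'')))

-- s.split(sep) for the nonempty seps ":" "," used below; split? is always `some` there (exact)
def pvSplit (s sep : String) : List String := (PySem.Str.split? s sep).getD []

def singleton_assert_value (response_str : String) (assert_str : String) : Option (List String) :=
  let response_list := pvSplit (pvRemSpecialChars response_str) ":"
  let assert_list := pvSplit (pvRemSpecialChars assert_str) ":"
  -- the two nested for-loops appending each v of str(value).split(',')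
  let temp_list := response_list.foldl (fun acc v => acc ++ pvSplit v ",") []
  -- assert_list[0] / assert_list[-1]: split results are never empty, so no IndexError
  let a0 := assert_list.headI
  let aL := assert_list.getLastD ""
  if PySem.List.count temp_list a0 ≠ 0 ∧ PySem.List.count temp_list aL ≠ 0 then
    -- list.index inside this branch always succeeds (count ≠ 0), so getD 0 is never taken
    some (PySem.List.slice temp_list (some ((PySem.List.index? temp_list a0).getD 0 : Int))
      (some (((PySem.List.index? temp_list aL).getD 0 : Int) + 1)))
  else if PySem.List.count temp_list a0 ≠ 0 then
    some (PySem.List.slice temp_list (some ((PySem.List.index? temp_list a0).getD 0 : Int))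
      (some (((PySem.List.index? temp_list a0).getD 0 : Int) + 2)))
  else none

-- ===== PORT B =====
def pvDropChars : List Char := ['{', '[', '}', ']', ' ', '"', '\'']

-- B's tokens(s, delims): one forward scan, ''.join(cur) = String.ofList (exact)
def pvTokens (s : String) (delims : List Char) : List String :=
  let st := s.toList.foldl (fun (st : List String × List Char) ch =>
    if ch ∈ delims then (st.1 ++ [String.ofList st.2], [])
    else if ch ∈ pvDropChars then st
    else (st.1, st.2 ++ [ch])) (([], []) : List String × List Char)
  st.1 ++ [String.ofList st.2]

def singleton_assert_value_alt (response_str : String) (assert_str : String) : Option (List String) :=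
  let temp := pvTokens response_str [':', ',']
  let aparts := pvTokens assert_str [':']
  -- aparts[0] / aparts[-1]: tokens always returns a nonempty list
  let first := aparts.headI
  let last := aparts.getLastD ""
  match PySem.List.index? temp first with
  | none => none                                         -- except ValueError: return None
  | some i =>
    match PySem.List.index? temp last with
    | none => some (PySem.List.slice temp (some (i : Int)) (some ((i : Int) + 2)))
    | some j => some (PySem.List.slice temp (some (i : Int)) (some ((j : Int) + 1)))

-- ===== PRECONDITION & SPEC =====
def Spec_singleton_assert_value (response_str : String) (assert_str : String) (out : Option (List String)) : Prop := out = singleton_assert_value_alt response_str assert_str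
instance (response_str : String) (assert_str : String) (out : Option (List String)) : Decidable (Spec_singleton_assert_value response_str assert_str out) := by unfold Spec_singleton_assert_value; infer_instance

-- ===== CLAIM (what is proved, stated in full; the proofs are below) =====
def Claim_equal_singleton_assert_value : Prop := ∀ (response_str : String) (assert_str : String), Dom_singleton_assert_value response_str assert_str → Spec_singleton_assert_value response_str assert_str (singleton_assert_value response_str assert_str)

-- ===== LEMMAS AND PROOFS =====

-- the string kept by pvRemSpecialChars / skipped by B's scan, as a predicate
def pvKeep (c : Char) : Bool :=
  !(c == '{' || c == '[' || c == '}' || c == ']' || c == ' ' || c == '"' || c == '\'')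

-- reference single-predicate splitter both temp lists are reduced to
def splitP (p : Char → Bool) : List Char → List (List Char)
  | [] => [[]]
  | x :: t =>
    if p x then [] :: splitP p t
    else match splitP p t with
      | h :: r => (x :: h) :: r
      | [] => [[x]]

theorem splitP_ne_nil (p : Char → Bool) (s : List Char) : splitP p s ≠ [] := by
  cases s with
  | nil => simp [splitP]
  | cons x t =>
    simp only [splitP]
    split
    · simp
    · split <;> simp_all

theorem go_eq (c : Char) (fuel : Nat) (l cur : List Char) (acc : List (List Char))
    (h : l.length < fuel) :
    PySem.Chars.splitOn.go [c] fuel l cur acc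
      = acc.reverse ++ (cur.reverse ++ (splitP (· == c) l).headI) :: (splitP (· == c) l).tail := by
  induction fuel generalizing l cur acc with
  | zero => omega
  | succ f ih =>
    cases l with
    | nil =>
      simp [PySem.Chars.splitOn.go, splitP]
    | cons x t =>
      rw [PySem.Chars.splitOn.go]
      simp only [List.length_cons] at h
      by_cases hx : x = c
      · subst hx
        simp only [List.isPrefixOf, Bool.and_true, beq_self_eq_true, if_pos, List.length_cons,
          List.length_nil, Nat.zero_add, List.drop_succ_cons, List.drop_zero]
        rw [ih t [] (cur.reverse :: acc) (by omega)]
        simp only [splitP, beq_self_eq_true, if_pos]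
        have := splitP_ne_nil (· == x) t
        cases hsp : splitP (· == x) t with
        | nil => exact absurd hsp this
        | cons a b => simp
      · have hbe : (c == x) = false := by simp [beq_eq_false_iff_ne]; exact fun e => hx e.symm
        simp only [List.isPrefixOf, hbe, Bool.false_and, Bool.and_true, if_neg, Bool.false_eq_true,
          not_false_eq_true]
        rw [ih t (x :: cur) acc (by omega)]
        have hpx : ((x == c) : Bool) = false := by simp [beq_eq_false_iff_ne]; exact hx
        simp only [splitP, hpx, Bool.false_eq_true, if_neg, not_false_eq_true]
        have := splitP_ne_nil (· == c) t
        cases hsp : splitP (· == c) t with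
        | nil => exact absurd hsp this
        | cons a b => simp

theorem splitOn_single (c : Char) (s : List Char) :
    PySem.Chars.splitOn s [c] = splitP (· == c) s := by
  rw [PySem.Chars.splitOn, go_eq c (s.length + 1) s [] [] (by omega)]
  have := splitP_ne_nil (· == c) s
  cases hsp : splitP (· == c) s with
  | nil => exact absurd hsp this
  | cons a b => simp

theorem flatMap_splitP (p q : Char → Bool) (s : List Char) :
    (splitP p s).flatMap (splitP q) = splitP (fun c => p c || q c) s := by
  induction s with
  | nil => simp [splitP]
  | cons x t ih =>
    by_cases hp : p x = true
    · simp only [splitP, hp, if_pos, Bool.true_or, List.flatMap_cons, ih]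
      simp [splitP]
    · simp only [splitP, hp, Bool.false_eq_true, if_neg, not_false_eq_true]
      obtain ⟨h1, r1, hpr⟩ : ∃ h1 r1, splitP p t = h1 :: r1 := by
        cases hsp : splitP p t with
        | nil => exact absurd hsp (splitP_ne_nil p t)
        | cons a b => exact ⟨a, b, rfl⟩
      rw [hpr]
      have ih' : splitP q h1 ++ (r1.flatMap (splitP q)) = splitP (fun c => p c || q c) t := by
        rw [← ih, hpr]; simp
      by_cases hq : q x = true
      · simp only [List.flatMap_cons, splitP, hq, hp, if_pos, Bool.false_or, Bool.or_self]
        rw [← ih']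
        simp [splitP, hq]
      · obtain ⟨h2, r2, hqr⟩ : ∃ h2 r2, splitP q h1 = h2 :: r2 := by
          cases hsq : splitP q h1 with
          | nil => exact absurd hsq (splitP_ne_nil q h1)
          | cons a b => exact ⟨a, b, rfl⟩
        have hcomb : (p x || q x) = false := by simp [hp, hq]
        simp only [List.flatMap_cons, splitP, hq, Bool.false_eq_true, if_neg, not_false_eq_true, hqr,
          hcomb, ← ih']
        simp [splitP]

theorem pvKeep_false_iff (c : Char) : pvKeep c = false ↔ c ∈ pvDropChars := by
  simp [pvKeep, pvDropChars]
  tauto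

theorem tokens_scan (delims : List Char) (hdel : ∀ c ∈ delims, pvKeep c = true)
    (s cur : List Char) (acc : List String) :
    (s.foldl (fun (st : List String × List Char) ch =>
        if ch ∈ delims then (st.1 ++ [String.ofList st.2], [])
        else if ch ∈ pvDropChars then st
        else (st.1, st.2 ++ [ch])) ((acc, cur) : List String × List Char)).1
      ++ [String.ofList (s.foldl (fun (st : List String × List Char) ch =>
        if ch ∈ delims then (st.1 ++ [String.ofList st.2], [])
        else if ch ∈ pvDropChars then st
        else (st.1, st.2 ++ [ch])) ((acc, cur) : List String × List Char)).2]
      = acc ++ String.ofList (cur ++ (splitP (fun c => decide (c ∈ delims)) (s.filter pvKeep)).headI)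
          :: ((splitP (fun c => decide (c ∈ delims)) (s.filter pvKeep)).tail.map String.ofList) := by
  induction s generalizing cur acc with
  | nil => simp [splitP]
  | cons x t ih =>
    by_cases hx : x ∈ delims
    · have hk : pvKeep x = true := hdel x hx
      simp only [List.foldl_cons, if_pos hx, List.filter_cons_of_pos hk]
      rw [ih]
      obtain ⟨h1, r1, hpr⟩ : ∃ h1 r1, splitP (fun c => decide (c ∈ delims)) (t.filter pvKeep) = h1 :: r1 := by
        cases hsp : splitP (fun c => decide (c ∈ delims)) (t.filter pvKeep) with
        | nil => exact absurd hsp (splitP_ne_nil _ _)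
        | cons a b => exact ⟨a, b, rfl⟩
      simp [splitP, hx, hpr]
    · by_cases hk : pvKeep x = true
      · have hnd : x ∉ pvDropChars := fun hm => by simp [(pvKeep_false_iff x).mpr hm] at hk
        simp only [List.foldl_cons, if_neg hx, if_neg hnd, List.filter_cons_of_pos hk]
        rw [ih]
        obtain ⟨h1, r1, hpr⟩ : ∃ h1 r1, splitP (fun c => decide (c ∈ delims)) (t.filter pvKeep) = h1 :: r1 := by
          cases hsp : splitP (fun c => decide (c ∈ delims)) (t.filter pvKeep) with
          | nil => exact absurd hsp (splitP_ne_nil _ _)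
          | cons a b => exact ⟨a, b, rfl⟩
        simp [splitP, hx, hpr]
      · have hk' : pvKeep x = false := by simpa using hk
        have hd : x ∈ pvDropChars := (pvKeep_false_iff x).mp hk'
        simp only [List.foldl_cons, if_neg hx, if_pos hd]
        rw [List.filter_cons_of_neg (by simp [hk'])]
        exact ih cur acc

theorem pvTokens_eq (s : String) (delims : List Char) (hdel : ∀ c ∈ delims, pvKeep c = true) :
    pvTokens s delims
      = (splitP (fun c => decide (c ∈ delims)) (s.toList.filter pvKeep)).map String.ofList := by
  simp only [pvTokens]
  rw [tokens_scan delims hdel s.toList [] []]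
  obtain ⟨h1, r1, hpr⟩ : ∃ h1 r1, splitP (fun c => decide (c ∈ delims)) (s.toList.filter pvKeep) = h1 :: r1 := by
    cases hsp : splitP (fun c => decide (c ∈ delims)) (s.toList.filter pvKeep) with
    | nil => exact absurd hsp (splitP_ne_nil _ _)
    | cons a b => exact ⟨a, b, rfl⟩
  simp [hpr]

theorem toList_rem (s : String) : (pvRemSpecialChars s).toList = s.toList.filter pvKeep := by
  simp only [pvRemSpecialChars, String.toList_ofList]; rfl

theorem pvSplit_single (s : String) (sep : String) (c : Char) (hsep : sep.toList = [c]) :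
    pvSplit s sep = (splitP (· == c) s.toList).map String.ofList := by
  simp [pvSplit, PySem.Str.split?, hsep, PySem.Chars.split?, splitOn_single]

theorem temp_eq (response_str : String) :
    (pvSplit (pvRemSpecialChars response_str) ":").foldl (fun acc v => acc ++ pvSplit v ",") []
      = pvTokens response_str [':', ','] := by
  rw [PySem.List.foldl_append_eq_flatMap, pvSplit_single _ ":" ':' rfl,
    pvTokens_eq _ _ (by intro c hc; fin_cases hc <;> rfl), toList_rem]
  rw [List.flatMap_map, List.nil_append]
  have : (fun a => pvSplit (String.ofList a) ",") = fun a => (splitP (· == ',') a).map String.ofList := by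
    funext a
    rw [pvSplit_single _ "," ',' rfl, String.toList_ofList]
  rw [this, ← List.map_flatMap, flatMap_splitP]
  have : (fun c => (c == ':') || (c == ',')) = (fun c => decide (c ∈ [':', ','])) := by
    funext c
    by_cases h1 : c = ':' <;> by_cases h2 : c = ',' <;> simp [h1, h2]
  rw [this]

theorem aparts_eq (assert_str : String) :
    pvSplit (pvRemSpecialChars assert_str) ":" = pvTokens assert_str [':'] := by
  rw [pvSplit_single _ ":" ':' rfl, pvTokens_eq _ _ (by intro c hc; fin_cases hc <;> rfl), toList_rem]
  have : (· == ':') = (fun c => decide (c ∈ [':'])) := by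
    funext c
    by_cases h1 : c = ':' <;> simp [h1]
  rw [this]

theorem branches_eq (temp : List String) (a0 aL : String) :
    (if PySem.List.count temp a0 ≠ 0 ∧ PySem.List.count temp aL ≠ 0 then
      some (PySem.List.slice temp (some ((PySem.List.index? temp a0).getD 0 : Int))
        (some (((PySem.List.index? temp aL).getD 0 : Int) + 1)))
    else if PySem.List.count temp a0 ≠ 0 then
      some (PySem.List.slice temp (some ((PySem.List.index? temp a0).getD 0 : Int))
        (some (((PySem.List.index? temp a0).getD 0 : Int) + 2)))
    else none)
      = (match PySem.List.index? temp a0 with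
        | none => none
        | some i =>
          match PySem.List.index? temp aL with
          | none => some (PySem.List.slice temp (some (i : Int)) (some ((i : Int) + 2)))
          | some j => some (PySem.List.slice temp (some (i : Int)) (some ((j : Int) + 1)))) := by
  cases h0 : PySem.List.index? temp a0 with
  | none =>
    have hm : a0 ∉ temp := (PySem.List.index?_eq_none_iff temp a0).mp h0
    simp [PySem.List.count_eq, List.count_eq_zero.mpr hm]
  | some i =>
    have hm : a0 ∈ temp := (PySem.List.index?_isSome_iff temp a0).mp (by rw [h0]; rfl)
    have hc : List.count a0 temp ≠ 0 := fun h => (List.count_eq_zero.mp h) hm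
    cases hL : PySem.List.index? temp aL with
    | none =>
      have hmL : aL ∉ temp := (PySem.List.index?_eq_none_iff temp aL).mp hL
      simp [PySem.List.count_eq, List.count_eq_zero.mpr hmL, hc]
    | some j =>
      have hmL : aL ∈ temp := (PySem.List.index?_isSome_iff temp aL).mp (by rw [hL]; rfl)
      have hcL : List.count aL temp ≠ 0 := fun h => (List.count_eq_zero.mp h) hmL
      simp [PySem.List.count_eq, hc, hcL]

-- ===== VERDICT (by name: the statement is the Claim_ definition above) =====
theorem singleton_assert_value_spec : Claim_equal_singleton_assert_value := by
  intro response_str assert_str _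
  simp only [Spec_singleton_assert_value, singleton_assert_value, singleton_assert_value_alt]
  rw [temp_eq, aparts_eq, branches_eq]
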